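-- pv_equiv track=rewrite | github.com/waytothevenus/Stablecoin_price_engine | utils/exchanges.py | select_best_trading_pair
-- ===== SOURCE A (Python) =====
-- def select_best_trading_pair(symbol, trading_pairs):
--     preferred_pairs = [
--         "USDT",
--         "USD",
--         "BUSD",
--         "BTC",
--         "ETH",
--         "USDC",
--     ]
--
--     # First, try to find a trading pair that matches the preferred pairs
--     for pair in preferred_pairs:
--         for trading_pair in trading_pairs:
--             if (
--                 trading_pair.startswith(symbol)
--                 | trading_pair.startswith(symbol.lower())
--             ) and (trading_pair.endswith(pair) | trading_pair.endswith(pair.lower())):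
--                 return trading_pair
--
--     # If no preferred pair is found, return the first trading pair that starts with the symbol
--     for trading_pair in trading_pairs:
--         if trading_pair.startswith(symbol):
--             return trading_pair
--     for trading_pair in trading_pairs:
--         if trading_pair.endswith(symbol):
--             return trading_pair
--     for trading_pair in trading_pairs:
--         if trading_pair.find(symbol) != -1:
--             return trading_pair
--
--     return None  # No suitable trading pair found
-- ===== SOURCE B (Python) =====
-- def _suffix_rank(trading_pair, preferred_pairs):
--     for j, pair in enumerate(preferred_pairs):
--         if trading_pair.endswith(pair) or trading_pair.endswith(pair.lower()):
--             return j
--     return None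
--
--
-- def select_best_trading_pair(symbol, trading_pairs):
--     preferred_pairs = [
--         "USDT",
--         "USD",
--         "BUSD",
--         "BTC",
--         "ETH",
--         "USDC",
--     ]
--     sym_lower = symbol.lower()
--
--     # Single pass: keep the pair whose preferred suffix has the smallest rank,
--     # earliest position winning ties (strict '<' keeps the first one seen).
--     best = None  # (rank, pair)
--     for trading_pair in trading_pairs:
--         if trading_pair.startswith(symbol) or trading_pair.startswith(sym_lower):
--             r = _suffix_rank(trading_pair, preferred_pairs)
--             if r is not None and (best is None or r < best[0]):
--                 best = (r, trading_pair)
--     if best is not None: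
--         return best[1]
--
--     # Fallbacks, in the same order as before.
--     for trading_pair in trading_pairs:
--         if trading_pair.startswith(symbol):
--             return trading_pair
--     for trading_pair in trading_pairs:
--         if trading_pair.endswith(symbol):
--             return trading_pair
--     for trading_pair in trading_pairs:
--         if symbol in trading_pair:
--             return trading_pair
--     return None
-- ===== Notes on version B (the rewrite author's own statement) =====
-- stated objective: faster
-- what changed: The nested preferred-suffix loop (one full rescan of trading_pairs per preferred suffix, recomputing symbol.lower() for every pair) is replaced by a single pass that computes each prefix-matching pair's preferred-suffix rank once and keeps the pair with the smallest rank (earliest on ties); symbol.lower() is hoisted out of the loop; the three fallback scans are kept unchanged.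
import Mathlib
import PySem

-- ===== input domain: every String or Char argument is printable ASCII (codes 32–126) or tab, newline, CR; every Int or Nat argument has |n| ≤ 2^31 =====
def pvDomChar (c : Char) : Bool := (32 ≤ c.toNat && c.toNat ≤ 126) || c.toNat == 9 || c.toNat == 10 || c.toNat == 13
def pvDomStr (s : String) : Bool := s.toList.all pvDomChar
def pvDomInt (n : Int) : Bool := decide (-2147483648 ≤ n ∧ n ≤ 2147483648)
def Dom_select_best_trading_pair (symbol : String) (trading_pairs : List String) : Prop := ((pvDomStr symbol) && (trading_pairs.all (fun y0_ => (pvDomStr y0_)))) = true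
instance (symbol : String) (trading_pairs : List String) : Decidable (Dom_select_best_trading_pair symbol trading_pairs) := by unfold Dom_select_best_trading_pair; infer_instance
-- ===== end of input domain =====

-- B replaces A's nested preferred-pair loop (one scan of trading_pairs per preferred suffix)
-- by a single pass keeping the pair of minimal preferred-suffix rank; same return value, same fallbacks.

-- ===== PORT A =====
-- A's outer loop over preferred_pairs; the inner 'for … return' is the first match, i.e. find?.
def pvPrefLoopA (symbol : String) (ps : List String) (tps : List String) : Option String :=
  match ps with
  | [] => none
  | p :: rest =>
    match tps.find? (fun tp =>
        (PySem.Str.startswith tp symbol || PySem.Str.startswith tp (PySem.Str.lower symbol))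
        && (PySem.Str.endswith tp p || PySem.Str.endswith tp (PySem.Str.lower p))) with
    | some tp => some tp
    | none => pvPrefLoopA symbol rest tps

def select_best_trading_pair (symbol : String) (trading_pairs : List String) : Option String :=
  match pvPrefLoopA symbol ["USDT", "USD", "BUSD", "BTC", "ETH", "USDC"] trading_pairs with
  | some tp => some tp
  | none =>
    match trading_pairs.find? (fun tp => PySem.Str.startswith tp symbol) with
    | some tp => some tp
    | none =>
      match trading_pairs.find? (fun tp => PySem.Str.endswith tp symbol) with
      | some tp => some tp
      | none =>
        match trading_pairs.find? (fun tp => PySem.Str.find tp symbol != (-1 : Int)) with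
        | some tp => some tp
        | none => none

-- ===== PORT B =====
-- Source B's _suffix_rank: first index j in ps whose suffix (or its lowercase) matches.
def pvSuffixRank (tp : String) (ps : List String) : Option Nat :=
  match ps with
  | [] => none
  | p :: rest =>
    if PySem.Str.endswith tp p || PySem.Str.endswith tp (PySem.Str.lower p) then some 0
    else (pvSuffixRank tp rest).map (· + 1)

-- Source B's single-pass loop body.
def pvStepB (symbol : String) (ps : List String) (best : Option (Nat × String)) (tp : String) :
    Option (Nat × String) :=
  if PySem.Str.startswith tp symbol || PySem.Str.startswith tp (PySem.Str.lower symbol) then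
    match pvSuffixRank tp ps with
    | some r =>
      match best with
      | none => some (r, tp)
      | some (br, bs) => if r < br then some (r, tp) else some (br, bs)
    | none => best
  else best

def select_best_trading_pair_alt (symbol : String) (trading_pairs : List String) : Option String :=
  match trading_pairs.foldl (pvStepB symbol ["USDT", "USD", "BUSD", "BTC", "ETH", "USDC"]) none with
  | some (_, tp) => some tp
  | none =>
    match trading_pairs.find? (fun tp => PySem.Str.startswith tp symbol) with
    | some tp => some tp
    | none =>
      match trading_pairs.find? (fun tp => PySem.Str.endswith tp symbol) with
      | some tp => some tp
      | none =>
        match trading_pairs.find? (fun tp => PySem.Str.isIn symbol tp) with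
        | some tp => some tp
        | none => none

-- ===== PRECONDITION & SPEC =====
def Spec_select_best_trading_pair (symbol : String) (trading_pairs : List String) (out : Option String) : Prop := out = select_best_trading_pair_alt symbol trading_pairs
instance (symbol : String) (trading_pairs : List String) (out : Option String) : Decidable (Spec_select_best_trading_pair symbol trading_pairs out) := by unfold Spec_select_best_trading_pair; infer_instance

-- ===== CLAIM (what is proved, stated in full; the proofs are below) =====
def Claim_equal_select_best_trading_pair : Prop := ∀ (symbol : String) (trading_pairs : List String), Dom_select_best_trading_pair symbol trading_pairs → Spec_select_best_trading_pair symbol trading_pairs (select_best_trading_pair symbol trading_pairs)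

-- ===== LEMMAS AND PROOFS =====

-- candidate of a single trading pair: its rank paired with it, if the prefix matches
def pvCand (symbol : String) (ps : List String) (tp : String) : Option (Nat × String) :=
  if PySem.Str.startswith tp symbol || PySem.Str.startswith tp (PySem.Str.lower symbol) then
    (pvSuffixRank tp ps).map (fun r => (r, tp))
  else none

-- left-biased min by rank
def pvComb (a b : Option (Nat × String)) : Option (Nat × String) :=
  match a, b with
  | none, m => m
  | some c, none => some c
  | some c, some d => if d.1 < c.1 then some d else some c

def pvMinP (symbol : String) (ps : List String) : List String → Option (Nat × String)
  | [] => none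
  | tp :: tps => pvComb (pvCand symbol ps tp) (pvMinP symbol ps tps)

theorem pvStepB_eq (symbol : String) (ps : List String) (best : Option (Nat × String)) (tp : String) :
    pvStepB symbol ps best tp = pvComb best (pvCand symbol ps tp) := by
  unfold pvStepB pvCand pvComb
  by_cases h : (PySem.Str.startswith tp symbol || PySem.Str.startswith tp (PySem.Str.lower symbol)) = true
  · simp only [h, if_true]
    cases hr : pvSuffixRank tp ps with
    | none => cases best <;> simp
    | some r => cases best with
      | none => simp
      | some c => cases c; simp
  · simp only [Bool.not_eq_true] at h
    simp only [h]
    cases best <;> simp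

theorem pvComb_assoc (a b c : Option (Nat × String)) :
    pvComb (pvComb a b) c = pvComb a (pvComb b c) := by
  rcases a with _ | ⟨ra, sa⟩ <;> rcases b with _ | ⟨rb, sb⟩ <;> rcases c with _ | ⟨rc, sc⟩ <;>
    simp only [pvComb] <;> split_ifs <;> (try simp only [pvComb]) <;> (try split_ifs) <;>
    first | rfl | omega

theorem pvFold_eq (symbol : String) (ps : List String) (tps : List String) :
    ∀ acc, tps.foldl (pvStepB symbol ps) acc = pvComb acc (pvMinP symbol ps tps) := by
  induction tps with
  | nil => intro acc; cases acc <;> rfl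
  | cons tp tps ih =>
    intro acc
    simp only [List.foldl_cons, pvStepB_eq, ih, pvMinP, pvComb_assoc]

def pvShift (m : Option (Nat × String)) : Option (Nat × String) :=
  m.map (fun c => (c.1 + 1, c.2))

theorem pvComb_shift (a b : Option (Nat × String)) :
    pvComb (pvShift a) (pvShift b) = pvShift (pvComb a b) := by
  rcases a with _ | ⟨ra, sa⟩ <;> rcases b with _ | ⟨rb, sb⟩ <;>
    simp only [pvComb, pvShift, Option.map_none, Option.map_some] <;> split_ifs <;>
    first | rfl | omega

-- structure of the min over (p :: ps): a rank-0 match (= A's inner find?) wins, else shift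
theorem pvMinP_cons_pref (symbol p : String) (ps : List String) (tps : List String) :
    pvMinP symbol (p :: ps) tps =
      match tps.find? (fun tp =>
          (PySem.Str.startswith tp symbol || PySem.Str.startswith tp (PySem.Str.lower symbol))
          && (PySem.Str.endswith tp p || PySem.Str.endswith tp (PySem.Str.lower p))) with
      | some tp => some (0, tp)
      | none => pvShift (pvMinP symbol ps tps) := by
  induction tps with
  | nil => rfl
  | cons tp tps ih =>
    by_cases hpre : (PySem.Str.startswith tp symbol || PySem.Str.startswith tp (PySem.Str.lower symbol)) = true
    · by_cases hsuf : (PySem.Str.endswith tp p || PySem.Str.endswith tp (PySem.Str.lower p)) = true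
      · -- head matches A's predicate: rank-0 candidate, absorbs everything
        have hpred : ((PySem.Str.startswith tp symbol || PySem.Str.startswith tp (PySem.Str.lower symbol))
            && (PySem.Str.endswith tp p || PySem.Str.endswith tp (PySem.Str.lower p))) = true := by
          rw [hpre, hsuf]; rfl
        have hcand : pvCand symbol (p :: ps) tp = some (0, tp) := by
          unfold pvCand pvSuffixRank
          rw [if_pos hpre, if_pos hsuf]; rfl
        rw [pvMinP]
        simp only [List.find?_cons, hpred]
        rw [hcand]
        cases pvMinP symbol (p :: ps) tps with
        | none => rfl
        | some c => simp only [pvComb]; rw [if_neg (by omega)]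
      · have hsuf' := Bool.not_eq_true _ |>.mp hsuf
        have hpred : ((PySem.Str.startswith tp symbol || PySem.Str.startswith tp (PySem.Str.lower symbol))
            && (PySem.Str.endswith tp p || PySem.Str.endswith tp (PySem.Str.lower p))) = false := by
          rw [hsuf', Bool.and_false]
        have hrank : pvSuffixRank tp (p :: ps) = (pvSuffixRank tp ps).map (· + 1) := by
          rw [pvSuffixRank, if_neg (by rw [hsuf']; simp)]
        have hcand : pvCand symbol (p :: ps) tp = pvShift (pvCand symbol ps tp) := by
          unfold pvCand pvShift
          rw [if_pos hpre, if_pos hpre, hrank]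
          cases pvSuffixRank tp ps <;> rfl
        rw [pvMinP]
        simp only [List.find?_cons, hpred]
        rw [ih, hcand]
        cases hf : tps.find? (fun tp =>
            (PySem.Str.startswith tp symbol || PySem.Str.startswith tp (PySem.Str.lower symbol))
            && (PySem.Str.endswith tp p || PySem.Str.endswith tp (PySem.Str.lower p))) with
        | some t =>
          -- a later rank-0 match beats any shifted head candidate
          cases hc : pvCand symbol ps tp with
          | none => rfl
          | some c => simp only [pvShift, Option.map_some, pvComb]; rw [if_pos (by omega)]
        | none =>
          rw [pvComb_shift, pvMinP]
    · have hpre' := Bool.not_eq_true _ |>.mp hpre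
      have hpred : ((PySem.Str.startswith tp symbol || PySem.Str.startswith tp (PySem.Str.lower symbol))
          && (PySem.Str.endswith tp p || PySem.Str.endswith tp (PySem.Str.lower p))) = false := by
        rw [hpre', Bool.false_and]
      have hcand : pvCand symbol (p :: ps) tp = none := by
        unfold pvCand; rw [if_neg (by rw [hpre']; simp)]
      have hcand' : pvCand symbol ps tp = none := by
        unfold pvCand; rw [if_neg (by rw [hpre']; simp)]
      rw [pvMinP]
      simp only [List.find?_cons, hpred]
      rw [hcand, ih, pvMinP, hcand']
      cases tps.find? (fun tp =>
          (PySem.Str.startswith tp symbol || PySem.Str.startswith tp (PySem.Str.lower symbol))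
          && (PySem.Str.endswith tp p || PySem.Str.endswith tp (PySem.Str.lower p))) <;> rfl

theorem pvMinP_nil_pref (symbol : String) (tps : List String) :
    pvMinP symbol [] tps = none := by
  induction tps with
  | nil => rfl
  | cons tp tps ih =>
    rw [pvMinP, ih]
    unfold pvCand pvSuffixRank
    split <;> rfl

-- A's preferred loop equals the projection of B's min
theorem pvPrefLoopA_eq_minP (symbol : String) (ps : List String) (tps : List String) :
    pvPrefLoopA symbol ps tps = (pvMinP symbol ps tps).map (·.2) := by
  induction ps with
  | nil => rw [pvMinP_nil_pref]; rfl
  | cons p ps ih =>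
    rw [pvPrefLoopA, pvMinP_cons_pref]
    cases hf : tps.find? (fun tp =>
        (PySem.Str.startswith tp symbol || PySem.Str.startswith tp (PySem.Str.lower symbol))
        && (PySem.Str.endswith tp p || PySem.Str.endswith tp (PySem.Str.lower p))) with
    | some t => rfl
    | none =>
      rw [ih]
      cases pvMinP symbol ps tps with
      | none => rfl
      | some c => rfl

theorem pvFind_congr {α : Type} (p q : α → Bool) (l : List α)
    (h : ∀ x, p x = q x) : l.find? p = l.find? q := by
  induction l with
  | nil => rfl
  | cons x l ih =>
    rw [List.find?_cons, List.find?_cons, h x, ih]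

-- 'tp.find(symbol) != -1' and 'symbol in tp' are the same test
theorem pvFind_isIn (symbol : String) (tps : List String) :
    tps.find? (fun tp => PySem.Str.find tp symbol != (-1 : Int))
      = tps.find? (fun tp => PySem.Str.isIn symbol tp) := by
  apply pvFind_congr
  intro tp
  by_cases h : symbol.toList <:+: tp.toList
  · have h1 : PySem.Str.find tp symbol ≠ -1 := (PySem.Str.find_ne_neg_one_iff tp symbol).mpr h
    have h2 : PySem.Str.isIn symbol tp = true := (PySem.Str.isIn_iff_infix symbol tp).mpr h
    rw [h2]
    simp only [bne_iff_ne, ne_eq]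
    exact h1
  · have h1 : PySem.Str.find tp symbol = -1 := by
      by_contra hc
      exact h ((PySem.Str.find_ne_neg_one_iff tp symbol).mp hc)
    have h2 : PySem.Str.isIn symbol tp = false := by
      rw [← Bool.not_eq_true]
      exact fun hc => h ((PySem.Str.isIn_iff_infix symbol tp).mp hc)
    rw [h1, h2, bne_self_eq_false]

-- ===== VERDICT (by name: the statement is the Claim_ definition above) =====
theorem select_best_trading_pair_spec : Claim_equal_select_best_trading_pair := by
  intro symbol tps _
  show select_best_trading_pair symbol tps = select_best_trading_pair_alt symbol tps
  unfold select_best_trading_pair select_best_trading_pair_alt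
  rw [pvFold_eq, pvFind_isIn, pvPrefLoopA_eq_minP]
  cases pvMinP symbol ["USDT", "USD", "BUSD", "BTC", "ETH", "USDC"] tps with
  | none => rfl
  | some c => rfl
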